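-- pv_equiv track=rewrite | github.com/AbdouJaouhar/Blabla | finetuning/rag_dataset_from_chunks.py | make_context_windows
-- ===== SOURCE A (Python) =====
-- BAD_CHUNK_PATTERNS = [
--     "in this paper",
--     "in this work",
--     "we propose",
--     "we present",
--     "our contributions",
--     "the rest of this paper",
--     "this study",
--     "related work",
--     "this paper aims",
--     "the experiment shows",
--     "researchers have been",
--     "study demonstrates",
-- ]
--
-- def is_bad_chunk(chunk: str) -> bool:
--     lo = chunk.lower()
--     return any(p in lo for p in BAD_CHUNK_PATTERNS)
--
-- def make_context_windows(chunks, max_chunks_per_context=3):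
--     contexts = []
--     current = []
--     for c in chunks:
--         ch = c["content"]
--
--         # pre-filter chunks
--         if is_bad_chunk(ch):
--             continue
--
--         current.append(ch)
--
--         if len(current) >= max_chunks_per_context:
--             contexts.append(current)
--             current = []
--
--     if current:
--         contexts.append(current)
--
--     return contexts
-- ===== SOURCE B (Python) =====
-- BAD_CHUNK_PATTERNS = [
--     "in this paper",
--     "in this work",
--     "we propose",
--     "we present",
--     "our contributions",
--     "the rest of this paper",
--     "this study",
--     "related work",
--     "this paper aims",
--     "the experiment shows",
--     "researchers have been",
--     "study demonstrates",
-- ]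
--
-- def is_bad_chunk(chunk: str) -> bool:
--     lo = chunk.lower()
--     return any(p in lo for p in BAD_CHUNK_PATTERNS)
--
-- def make_context_windows(chunks, max_chunks_per_context=3):
--     good = [c["content"] for c in chunks if not is_bad_chunk(c["content"])]
--     # A appends before testing the size, so any max <= 1 yields windows of size 1
--     step = max_chunks_per_context if max_chunks_per_context >= 1 else 1
--     return [good[i:i + step] for i in range(0, len(good), step)]
-- ===== Notes on version B (the rewrite author's own statement) =====
-- stated objective: simpler
-- what changed: Replaces the running accumulator/counter/flush loop by a filter comprehension followed by index slicing (good[i:i+step] over range(0, len(good), step)) with the step clamped to at least 1, which reproduces A's size-1 windows for non-positive window sizes and the trailing partial window.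
import Mathlib
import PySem

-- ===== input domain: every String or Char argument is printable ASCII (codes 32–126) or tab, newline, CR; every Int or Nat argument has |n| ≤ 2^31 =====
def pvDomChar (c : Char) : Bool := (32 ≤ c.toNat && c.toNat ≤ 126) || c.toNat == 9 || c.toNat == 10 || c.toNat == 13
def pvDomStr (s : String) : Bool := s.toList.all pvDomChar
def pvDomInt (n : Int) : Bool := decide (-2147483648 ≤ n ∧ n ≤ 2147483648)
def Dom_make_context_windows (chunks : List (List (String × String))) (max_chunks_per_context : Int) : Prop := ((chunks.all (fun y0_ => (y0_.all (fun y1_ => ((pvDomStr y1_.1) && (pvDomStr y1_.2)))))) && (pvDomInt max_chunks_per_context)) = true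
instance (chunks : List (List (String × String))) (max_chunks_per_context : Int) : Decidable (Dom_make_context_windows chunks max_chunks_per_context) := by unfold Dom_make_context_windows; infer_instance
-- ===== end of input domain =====

-- B replaces A's accumulator/counter/flush loop by a filter comprehension plus index
-- slicing with the step clamped to ≥ 1 (objective: simpler). Return-value equivalence only.

-- module-level helpers shared by both Python versions
def BAD_CHUNK_PATTERNS : List String :=
  ["in this paper", "in this work", "we propose", "we present", "our contributions",
   "the rest of this paper", "this study", "related work", "this paper aims",
   "the experiment shows", "researchers have been", "study demonstrates"]

def is_bad_chunk (chunk : String) : Bool :=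
  let lo := PySem.Str.lower chunk
  BAD_CHUNK_PATTERNS.any (fun p => PySem.Str.isIn p lo)

-- ===== PORT A =====
-- c["content"] is a first-match association-list lookup; the KeyError case (no "content"
-- key) is excluded by Pre_, so the .getD "" default is never reached on admitted inputs.
def mcwStep (m : Int) (st : List (List String) × List String) (c : List (String × String)) :
    List (List String) × List String :=
  let ch := (List.lookup "content" c).getD ""
  if is_bad_chunk ch then st
  else
    let current := st.2 ++ [ch]
    if m ≤ (current.length : Int) then (st.1 ++ [current], [])
    else (st.1, current)

def make_context_windows (chunks : List (List (String × String))) (max_chunks_per_context : Int) : List (List String) :=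
  let r := chunks.foldl (mcwStep max_chunks_per_context) ([], [])
  if r.2.isEmpty then r.1 else r.1 ++ [r.2]

-- ===== PORT B =====
def make_context_windows_alt (chunks : List (List (String × String))) (max_chunks_per_context : Int) : List (List String) :=
  let good := chunks.filterMap (fun c =>
    let ch := (List.lookup "content" c).getD ""
    if is_bad_chunk ch then none else some ch)
  let step : Int := if 1 ≤ max_chunks_per_context then max_chunks_per_context else 1
  (PySem.List.pyRange 0 (good.length : Int) step).map
    (fun i => PySem.List.slice good (some i) (some (i + step)))

-- ===== PRECONDITION & SPEC =====
-- Pre_ excludes exactly the chunks lacking a "content" key, on which Python A raises KeyError.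
def Pre_make_context_windows (chunks : List (List (String × String))) (max_chunks_per_context : Int) : Prop :=
  (chunks.all (fun c => (List.lookup "content" c).isSome)) = true
instance (chunks : List (List (String × String))) (max_chunks_per_context : Int) : Decidable (Pre_make_context_windows chunks max_chunks_per_context) := by unfold Pre_make_context_windows; infer_instance

def pvWitness_make_context_windows : (List (List (String × String))) × Int :=
  ([[("content", "alpha")], [("content", "beta")], [("content", "gamma")]], 2)

def Spec_make_context_windows (chunks : List (List (String × String))) (max_chunks_per_context : Int) (out : List (List String)) : Prop := out = make_context_windows_alt chunks max_chunks_per_context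
instance (chunks : List (List (String × String))) (max_chunks_per_context : Int) (out : List (List String)) : Decidable (Spec_make_context_windows chunks max_chunks_per_context out) := by unfold Spec_make_context_windows; infer_instance

-- ===== CLAIM (what is proved, stated in full; the proofs are below) =====
def Claim_equal_make_context_windows : Prop := ∀ (chunks : List (List (String × String))) (max_chunks_per_context : Int), Dom_make_context_windows chunks max_chunks_per_context → Pre_make_context_windows chunks max_chunks_per_context → Spec_make_context_windows chunks max_chunks_per_context (make_context_windows chunks max_chunks_per_context)

-- ===== LEMMAS AND PROOFS =====

-- proof-side chunking function: windows of width w+1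
def chunkW {α : Type} (w : Nat) : List α → List (List α)
  | [] => []
  | x :: xs => (x :: xs).take (w + 1) :: chunkW w ((x :: xs).drop (w + 1))
  termination_by l => l.length
  decreasing_by simp

theorem chunkW_ne_nil {α : Type} (w : Nat) (l : List α) (h : l ≠ []) :
    chunkW w l = l.take (w + 1) :: chunkW w (l.drop (w + 1)) := by
  cases l with
  | nil => exact absurd rfl h
  | cons x xs => rw [chunkW]

-- the step function of A restricted to the good contents
def strStep (m : Int) (st : List (List String) × List String) (ch : String) :
    List (List String) × List String :=
  let current := st.2 ++ [ch]
  if m ≤ (current.length : Int) then (st.1 ++ [current], []) else (st.1, current)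

def goodOf (chunks : List (List (String × String))) : List String :=
  chunks.filterMap (fun c =>
    let ch := (List.lookup "content" c).getD ""
    if is_bad_chunk ch then none else some ch)

theorem foldl_mcw_eq_good (m : Int) (chunks : List (List (String × String)))
    (st : List (List String) × List String) :
    chunks.foldl (mcwStep m) st = (goodOf chunks).foldl (strStep m) st := by
  induction chunks generalizing st with
  | nil => rfl
  | cons c cs ih =>
      simp only [goodOf, List.filterMap_cons] at *
      by_cases hb : is_bad_chunk ((List.lookup "content" c).getD "") = true
      · simp [List.foldl_cons, mcwStep, hb, ih]
      · simp only [Bool.not_eq_true] at hb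
        simp [List.foldl_cons, mcwStep, strStep, hb, ih]

-- A's loop with a partially filled current window produces exactly the width-s chunking
theorem strLoop_chunkW (m : Int) (s : Nat) (hs : (if 1 ≤ m then m else 1) = (s : Int))
    (g : List String) : ∀ (ctxs : List (List String)) (cur : List String),
    cur.length + 1 ≤ s →
    (let r := g.foldl (strStep m) (ctxs, cur)
     if r.2.isEmpty then r.1 else r.1 ++ [r.2]) = ctxs ++ chunkW (s - 1) (cur ++ g) := by
  have hs1 : 1 ≤ s := by by_cases h : 1 ≤ m <;> simp [h] at hs <;> omega
  induction g with
  | nil =>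
      intro ctxs cur hcur
      by_cases hc : cur = []
      · subst hc; simp [chunkW]
      · simp only [List.foldl_nil]
        rw [if_neg (by simpa [List.isEmpty_iff] using hc), List.append_nil, chunkW_ne_nil _ _ hc]
        rw [List.take_of_length_le (by omega), List.drop_of_length_le (by omega)]
        simp [chunkW]
  | cons ch g' ih =>
      intro ctxs cur hcur
      simp only [List.foldl_cons]
      have hcond : (m ≤ ((cur ++ [ch]).length : Int)) ↔ (s ≤ (cur ++ [ch]).length) := by
        simp only [List.length_append, List.length_cons, List.length_nil]
        by_cases h : 1 ≤ m <;> simp [h] at hs ⊢ <;> omega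
      by_cases hfull : s ≤ (cur ++ [ch]).length
      · have hm : m ≤ ((cur.length : Int)) + 1 := by
          have := hcond.mpr hfull; simpa using this
        have hlen : (cur ++ [ch]).length = s := by simp at hfull ⊢; omega
        rw [show strStep m (ctxs, cur) ch = (ctxs ++ [cur ++ [ch]], []) from by
          simp [strStep, hm]]
        rw [ih (ctxs ++ [cur ++ [ch]]) [] (by simp only [List.length_nil]; omega)]
        rw [show cur ++ ch :: g' = (cur ++ [ch]) ++ g' from by simp]
        rw [chunkW_ne_nil (s-1) ((cur ++ [ch]) ++ g') (by simp)]
        rw [show s - 1 + 1 = s from by omega]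
        rw [List.take_left' hlen, List.drop_left' hlen]
        simp
      · have hm : ¬ m ≤ ((cur.length : Int)) + 1 := by
          intro h; exact hfull (hcond.mp (by simpa using h))
        rw [show strStep m (ctxs, cur) ch = (ctxs, cur ++ [ch]) from by
          simp [strStep, hm]]
        rw [ih ctxs (cur ++ [ch]) (by simp at hfull ⊢; omega)]
        simp

-- peel lemma: a positive-step range on a positive bound
theorem pyRange_pos_peel (n S : Int) (hS : 0 < S) (hn : 0 < n) :
    PySem.List.pyRange 0 n S = 0 :: (PySem.List.pyRange 0 (n - S) S).map (· + S) := by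
  rw [PySem.List.pyRange_of_pos 0 n hS, PySem.List.pyRange_of_pos 0 (n - S) hS]
  have hdiv : (n + S - 1) / S = (n - 1) / S + 1 := by
    have h := Int.add_mul_ediv_right (n - 1) 1 (by omega : S ≠ 0)
    rw [one_mul] at h
    rw [show n + S - 1 = n - 1 + S by ring, h]
  have hM : (if (0:Int) < n then ((n - 0 + S - 1) / S).toNat else 0)
      = (if (0:Int) < n - S then ((n - S - 0 + S - 1) / S).toNat else 0) + 1 := by
    rw [if_pos hn, show n - 0 + S - 1 = n + S - 1 by ring, hdiv,
        show n - S - 0 + S - 1 = n - 1 by ring]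
    by_cases hlt : (0:Int) < n - S
    · rw [if_pos hlt]
      have h1 : 0 ≤ (n - 1) / S := Int.ediv_nonneg (by omega) (by omega)
      omega
    · rw [if_neg hlt]
      have h0 : (n - 1) / S = 0 := by
        have hub : (n - 1) / S < 1 := by
          rw [Int.ediv_lt_iff_lt_mul hS]; omega
        have hlb : 0 ≤ (n - 1) / S := Int.ediv_nonneg (by omega) (by omega)
        omega
      omega
  rw [hM, List.range_succ_eq_map]
  simp only [List.map_cons, List.map_map]
  congr 1
  · simp
  · apply List.map_congr_left
    intro k _
    simp only [Function.comp, Nat.succ_eq_add_one]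
    push_cast
    ring

-- B's slicing over a stepped range is the width-s chunking
theorem slices_chunkW (S : Int) (s : Nat) (hS : S = (s : Int)) (hs1 : 1 ≤ s)
    (g : List String) :
    (PySem.List.pyRange 0 (g.length : Int) S).map
      (fun i => PySem.List.slice g (some i) (some (i + S))) = chunkW (s - 1) g := by
  have hSpos : 0 < S := by rw [hS]; exact_mod_cast hs1
  by_cases hg : g = []
  · subst hg
    rw [show ((List.length ([] : List String) : Int)) = 0 from by simp]
    rw [PySem.List.pyRange_of_pos 0 0 hSpos, if_neg (by omega)]
    simp [chunkW]
  · have hlen : 0 < ((g.length : Int)) := by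
      have := List.length_pos_of_ne_nil hg; exact_mod_cast this
    rw [pyRange_pos_peel _ _ hSpos hlen, chunkW_ne_nil _ _ hg,
        show s - 1 + 1 = s from by omega]
    simp only [List.map_cons, List.map_map]
    congr 1
    · rw [zero_add, hS, PySem.List.slice_zero_start, PySem.List.slice_to_natCast]
    · by_cases hle : s ≤ g.length
      · have hdl : ((g.drop s).length : Int) = (g.length : Int) - S := by
          rw [hS]; simp [List.length_drop]; omega
        rw [show (g.length : Int) - S = ((g.drop s).length : Int) from hdl.symm]
        have hrec := slices_chunkW S s hS hs1 (g.drop s)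
        rw [← hrec]
        apply List.map_congr_left
        intro i hi
        have h0i : 0 ≤ i := ((PySem.List.mem_pyRange_iff_of_pos hSpos i).mp hi).1
        simp only [Function.comp]
        rw [PySem.List.slice_toNat _ (by omega) (by omega),
            PySem.List.slice_toNat _ h0i (by omega)]
        rw [List.drop_drop]
        congr 1 <;> [skip; congr 1] <;> omega
      · have hdrop : g.drop s = [] := List.drop_eq_nil_of_le (by omega)
        have hr : PySem.List.pyRange 0 ((g.length : Int) - S) S = [] := by
          rw [PySem.List.pyRange_of_pos _ _ hSpos, if_neg (by omega)]
          simp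
        rw [hr, hdrop]
        simp [chunkW]
  termination_by g.length
  decreasing_by
    have := List.length_pos_of_ne_nil hg
    simp only [List.length_drop]
    omega

-- ===== VERDICT (by name: the statement is the Claim_ definition above) =====
theorem make_context_windows_spec : Claim_equal_make_context_windows := by
  intro chunks m _ _
  show make_context_windows chunks m = make_context_windows_alt chunks m
  have hS0 : 0 ≤ (if 1 ≤ m then m else 1) := by by_cases h : 1 ≤ m <;> simp [h] <;> omega
  set s : Nat := (if 1 ≤ m then m else 1).toNat with hsdef
  have hs : (if 1 ≤ m then m else 1) = (s : Int) := by omega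
  have hs1 : 1 ≤ s := by by_cases h : 1 ≤ m <;> simp [h] at hs ⊢ <;> omega
  unfold make_context_windows make_context_windows_alt
  rw [foldl_mcw_eq_good]
  have hA := strLoop_chunkW m s hs (goodOf chunks) [] [] (by simp only [List.length_nil]; omega)
  simp only [List.nil_append] at hA
  rw [hA]
  rw [hs]
  exact (slices_chunkW (s : Int) s rfl hs1 (goodOf chunks)).symm
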